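-- pv_equiv track=rewrite | github.com/cs13syy/projects | brand-sentimental-analysis/LDA/LDA-mallet.py | pos_extractor
-- ===== SOURCE A (Python) =====
-- def pos_extractor(parsed):
--
--     noun_list = []
--     adj_list = []
--     verb_list = []
--     nav_list = []
--     adv_list = []
--
--     for i in parsed:
--
--         if i[1] in ['NN', 'NNS', 'NNP', 'NNPS']:
--             noun_list.append(i[0])
--             nav_list.append(i[0])
--         elif i[1] in ['JJ', 'JJR', 'JJS']:
--             adj_list.append(i[0])
--             nav_list.append(i[0])
--         elif i[1] in ['VB', 'VBD', 'VBG', 'VBN', 'VBP', 'VBZ']: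
--             verb_list.append(i[0])
--             nav_list.append(i[0])
--         elif i[1] == ['RB', 'RBR', 'RBS']:
--             adv_list.append(i[0])
--             nav_list.append(i[0])
--
--         else:
--             pass
--
--     return [nav_list, noun_list, adj_list,
--             verb_list]
-- ===== SOURCE B (Python) =====
-- NOUN_TAGS = {'NN', 'NNS', 'NNP', 'NNPS'}
-- ADJ_TAGS = {'JJ', 'JJR', 'JJS'}
-- VERB_TAGS = {'VB', 'VBD', 'VBG', 'VBN', 'VBP', 'VBZ'}
-- NAV_TAGS = NOUN_TAGS | ADJ_TAGS | VERB_TAGS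
--
--
-- def pos_extractor(parsed):
--     return [[t[0] for t in parsed if t[1] in NAV_TAGS],
--             [t[0] for t in parsed if t[1] in NOUN_TAGS],
--             [t[0] for t in parsed if t[1] in ADJ_TAGS],
--             [t[0] for t in parsed if t[1] in VERB_TAGS]]
-- ===== Notes on version B (the rewrite author's own statement) =====
-- stated objective: simpler
-- what changed: Replaces A's single loop maintaining five mutable accumulators (including a dead adverb branch whose condition compares a string to a list and can never fire) with four independent document-order filter passes, one per returned list; nav is built by its own scan over parsed.
import Mathlib
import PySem

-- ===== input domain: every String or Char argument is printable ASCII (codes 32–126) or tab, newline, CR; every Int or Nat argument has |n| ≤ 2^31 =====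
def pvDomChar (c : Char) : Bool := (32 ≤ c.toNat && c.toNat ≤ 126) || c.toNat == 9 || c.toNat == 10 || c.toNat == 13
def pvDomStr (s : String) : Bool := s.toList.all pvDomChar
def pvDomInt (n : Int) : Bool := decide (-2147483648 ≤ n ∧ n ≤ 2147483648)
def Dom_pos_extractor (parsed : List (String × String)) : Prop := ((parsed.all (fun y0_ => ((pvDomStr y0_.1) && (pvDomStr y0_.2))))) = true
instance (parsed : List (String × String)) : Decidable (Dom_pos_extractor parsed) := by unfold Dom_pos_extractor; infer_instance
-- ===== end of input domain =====

-- B replaces A's single five-accumulator loop (with a dead adverb branch) by four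
-- independent document-order filter passes, one per returned list (objective: simpler).

-- ===== PORT A =====
-- A's loop state: (noun_list, adj_list, verb_list, nav_list, adv_list)
def posStep (st : List String × List String × List String × List String × List String)
    (i : String × String) :
    List String × List String × List String × List String × List String :=
  let (noun, adj, verb, nav, adv) := st
  if i.2 ∈ ["NN", "NNS", "NNP", "NNPS"] then
    (noun ++ [i.1], adj, verb, nav ++ [i.1], adv)
  else if i.2 ∈ ["JJ", "JJR", "JJS"] then
    (noun, adj ++ [i.1], verb, nav ++ [i.1], adv)
  else if i.2 ∈ ["VB", "VBD", "VBG", "VBN", "VBP", "VBZ"] then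
    (noun, adj, verb ++ [i.1], nav ++ [i.1], adv)
  else
    -- A's fourth branch compares i[1] (a string) with the list ['RB','RBR','RBS'];
    -- that equality is always false in Python, so it is the identity here as there.
    (noun, adj, verb, nav, adv)

def pos_extractor (parsed : List (String × String)) : List (List String) :=
  let st := parsed.foldl posStep ([], [], [], [], [])
  [st.2.2.2.1, st.1, st.2.1, st.2.2.1]

-- ===== PORT B =====
def nounTags : List String := ["NN", "NNS", "NNP", "NNPS"]
def adjTags : List String := ["JJ", "JJR", "JJS"]
def verbTags : List String := ["VB", "VBD", "VBG", "VBN", "VBP", "VBZ"]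
def navTags : List String := nounTags ++ adjTags ++ verbTags

def pos_extractor_alt (parsed : List (String × String)) : List (List String) :=
  [(parsed.filter (fun t => t.2 ∈ navTags)).map (·.1),
   (parsed.filter (fun t => t.2 ∈ nounTags)).map (·.1),
   (parsed.filter (fun t => t.2 ∈ adjTags)).map (·.1),
   (parsed.filter (fun t => t.2 ∈ verbTags)).map (·.1)]

-- ===== PRECONDITION & SPEC =====
def Spec_pos_extractor (parsed : List (String × String)) (out : List (List String)) : Prop := out = pos_extractor_alt parsed
instance (parsed : List (String × String)) (out : List (List String)) : Decidable (Spec_pos_extractor parsed out) := by unfold Spec_pos_extractor; infer_instance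

-- ===== CLAIM (what is proved, stated in full; the proofs are below) =====
def Claim_equal_pos_extractor : Prop := ∀ (parsed : List (String × String)), Dom_pos_extractor parsed → Spec_pos_extractor parsed (pos_extractor parsed)

-- ===== LEMMAS AND PROOFS =====
theorem noun_not_adj (s : String) (h : s ∈ nounTags) : s ∉ adjTags := by
  simp only [nounTags] at h; fin_cases h <;> decide
theorem noun_not_verb (s : String) (h : s ∈ nounTags) : s ∉ verbTags := by
  simp only [nounTags] at h; fin_cases h <;> decide
theorem adj_not_verb (s : String) (h : s ∈ adjTags) : s ∉ verbTags := by
  simp only [adjTags] at h; fin_cases h <;> decide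


theorem posFold_eq (parsed : List (String × String))
    (noun adj verb nav adv : List String) :
    parsed.foldl posStep (noun, adj, verb, nav, adv) =
      (noun ++ (parsed.filter (fun t => t.2 ∈ nounTags)).map (·.1),
       adj  ++ (parsed.filter (fun t => t.2 ∈ adjTags)).map (·.1),
       verb ++ (parsed.filter (fun t => t.2 ∈ verbTags)).map (·.1),
       nav  ++ (parsed.filter (fun t => t.2 ∈ navTags)).map (·.1),
       adv) := by
  induction parsed generalizing noun adj verb nav adv with
  | nil => simp
  | cons h t ih =>
    simp only [List.foldl_cons, posStep]
    by_cases h1 : h.2 ∈ nounTags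
    · have h2 := noun_not_adj h.2 h1
      have h3 := noun_not_verb h.2 h1
      have hnav : h.2 ∈ navTags := by simp [navTags]; tauto
      rw [if_pos (by simpa [nounTags] using h1)]
      simp [ih, h1, h2, h3, hnav]
    · rw [if_neg (by simpa [nounTags] using h1)]
      by_cases h2 : h.2 ∈ adjTags
      · have h3 := adj_not_verb h.2 h2
        have hnav : h.2 ∈ navTags := by simp [navTags]; tauto
        rw [if_pos (by simpa [adjTags] using h2)]
        simp [ih, h1, h2, h3, hnav]
      · rw [if_neg (by simpa [adjTags] using h2)]
        by_cases h3 : h.2 ∈ verbTags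
        · have hnav : h.2 ∈ navTags := by simp [navTags]; tauto
          rw [if_pos (by simpa [verbTags] using h3)]
          simp [ih, h1, h2, h3, hnav]
        · have hnav : h.2 ∉ navTags := by simp [navTags]; tauto
          rw [if_neg (by simpa [verbTags] using h3)]
          simp [ih, h1, h2, h3, hnav]

-- ===== VERDICT (by name: the statement is the Claim_ definition above) =====
theorem pos_extractor_spec : Claim_equal_pos_extractor := by
  intro parsed _
  unfold Spec_pos_extractor pos_extractor pos_extractor_alt
  rw [posFold_eq]
  rfl
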